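-- pv_equiv track=rewrite | github.com/rubelw/OSSS | src/OSSS/ai/agents/query_data/handlers/vendors_handler.py | _preferred_field_order
-- ===== SOURCE A (Python) =====
-- from typing import Any, Dict, List
--
-- def _preferred_field_order(fields: List[str]) -> List[str]:
--     """
--     Define a stable, human-friendly ordering for vendor-like tables.
--     Any missing fields are appended at the end.
--     """
--     preferred = [
--         "id",
--         "name",
--         "email",
--         "phone",
--         "contact_name",
--         "url",
--         "created_at",
--         "updated_at",
--     ]
--     ordered = [f for f in preferred if f in fields]
--     for f in fields:
--         if f not in ordered:
--             ordered.append(f)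
--     return ordered
-- ===== SOURCE B (Python) =====
-- from typing import Any, Dict, List
--
-- def _preferred_field_order(fields: List[str]) -> List[str]:
--     """
--     Define a stable, human-friendly ordering for vendor-like tables.
--     Any missing fields are appended at the end.
--     """
--     preferred = [
--         "id",
--         "name",
--         "email",
--         "phone",
--         "contact_name",
--         "url",
--         "created_at",
--         "updated_at",
--     ]
--     rank = {name: i for i, name in enumerate(preferred)}
--     buckets = [[] for _ in range(len(preferred) + 1)]
--     for f in dict.fromkeys(fields):
--         buckets[rank.get(f, len(preferred))].append(f)
--     return [f for bucket in buckets for f in bucket]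
-- ===== Notes on version B (the rewrite author's own statement) =====
-- stated objective: faster
-- what changed: Replaces A's quadratic membership-scan loop (each field checked against the growing result list) by a one-pass bucket sort: a rank table over the preferred names, dict.fromkeys deduplication, and appending each distinct field to the bucket of its rank.
import Mathlib
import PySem

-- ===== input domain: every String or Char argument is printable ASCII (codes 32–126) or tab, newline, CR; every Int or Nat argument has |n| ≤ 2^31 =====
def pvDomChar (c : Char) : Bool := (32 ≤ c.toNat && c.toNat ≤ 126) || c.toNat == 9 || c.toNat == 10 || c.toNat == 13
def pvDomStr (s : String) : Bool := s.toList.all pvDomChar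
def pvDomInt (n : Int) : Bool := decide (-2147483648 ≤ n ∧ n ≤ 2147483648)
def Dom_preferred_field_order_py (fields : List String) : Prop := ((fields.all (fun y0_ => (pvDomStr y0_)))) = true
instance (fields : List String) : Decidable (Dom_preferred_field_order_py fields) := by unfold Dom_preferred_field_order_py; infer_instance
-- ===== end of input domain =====

-- B replaces A's quadratic membership-scan loop by a one-pass bucket sort over a rank table; return values proved equal.


-- ===== PORT A =====
def preferred_field_order_py (fields : List String) : List String :=
  let preferred : List String :=
    ["id", "name", "email", "phone", "contact_name", "url", "created_at", "updated_at"]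
  let ordered := preferred.filter (fun f => fields.contains f)
  fields.foldl (fun ordered f => if ordered.contains f then ordered else ordered ++ [f]) ordered

-- ===== PORT B =====
def preferred_field_order_py_alt (fields : List String) : List String :=
  let preferred : List String :=
    ["id", "name", "email", "phone", "contact_name", "url", "created_at", "updated_at"]
  let rank : PySem.Dict String Int :=
    (PySem.List.enumerate preferred).foldl (fun d p => d.insert p.2 p.1) PySem.Dict.empty
  let buckets : List (List String) := List.replicate (preferred.length + 1) []
  -- the bucket index rank.get(f, len(preferred)) is one of 0..8 (never negative), so .toNat is exact here
  let buckets := (PySem.List.dedup fields).foldl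
    (fun bs f => bs.modify (PySem.Dict.getD rank f ((preferred.length : Nat) : Int)).toNat
      (fun b => b ++ [f])) buckets
  buckets.flatten

-- ===== PRECONDITION & SPEC =====
def Spec_preferred_field_order_py (fields : List String) (out : List String) : Prop := out = preferred_field_order_py_alt fields
instance (fields : List String) (out : List String) : Decidable (Spec_preferred_field_order_py fields out) := by unfold Spec_preferred_field_order_py; infer_instance

-- ===== CLAIM (what is proved, stated in full; the proofs are below) =====
def Claim_equal_preferred_field_order_py : Prop := ∀ (fields : List String), Dom_preferred_field_order_py fields → Spec_preferred_field_order_py fields (preferred_field_order_py fields)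

-- ===== LEMMAS AND PROOFS =====

-- the fixed preferred list (proof-side name for the literal both ports contain)
def pfoPref : List String :=
  ["id", "name", "email", "phone", "contact_name", "url", "created_at", "updated_at"]

-- the rank dictionary B builds (definitionally the port's fold)
def pfoRank : PySem.Dict String Int :=
  (PySem.List.enumerate pfoPref).foldl (fun d p => d.insert p.2 p.1) PySem.Dict.empty

-- the shape of B's bucket state after processing the (nodup) prefix p of the deduplicated input
def pfoBuckets (p : List String) : List (List String) :=
  (pfoPref.map (fun n => if n ∈ p then [n] else [])) ++ [p.filter (fun f => !(pfoPref.contains f))]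

-- splitting the accumulator of the dedup-style fold (A's loop body is PySem.Set.add)
theorem pfo_foldl_add_split (rest : List String) : ∀ (base e : List String),
    rest.foldl PySem.Set.add (base ++ e)
      = base ++ (rest.filter (fun f => !(base.contains f))).foldl PySem.Set.add e := by
  induction rest with
  | nil => intro base e; simp
  | cons f r ih =>
    intro base e
    by_cases hb : f ∈ base
    · simp [List.foldl_cons, PySem.Set.add, hb, ih base e]
    · by_cases he : f ∈ e
      · have h1 : PySem.Set.add (base ++ e) f = base ++ e := by
          simp [PySem.Set.add, he]
        have h2 : PySem.Set.add e f = e := by simp [PySem.Set.add, he]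
        simp [List.foldl_cons, h1, h2, hb, ih base e]
      · have h1 : PySem.Set.add (base ++ e) f = base ++ (e ++ [f]) := by
          simp [PySem.Set.add, hb, he]
        have h2 : PySem.Set.add e f = e ++ [f] := by simp [PySem.Set.add, he]
        simp [List.foldl_cons, h1, h2, hb, ih base (e ++ [f])]

-- filtering commutes with the dedup fold
theorem pfo_filter_foldl_add (p : String → Bool) (l : List String) : ∀ (acc : List String),
    (l.foldl PySem.Set.add acc).filter p = (l.filter p).foldl PySem.Set.add (acc.filter p) := by
  induction l with
  | nil => intro acc; simp
  | cons x l ih =>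
    intro acc
    by_cases hx : p x
    · by_cases hm : x ∈ acc
      · have h1 : PySem.Set.add acc x = acc := by simp [PySem.Set.add, hm]
        have h2 : PySem.Set.add (acc.filter p) x = acc.filter p := by
          simp [PySem.Set.add, List.mem_filter, hm, hx]
        simp [List.foldl_cons, h1, h2, hx, ih acc]
      · have h1 : PySem.Set.add acc x = acc ++ [x] := by simp [PySem.Set.add, hm]
        have h2 : PySem.Set.add (acc.filter p) x = acc.filter p ++ [x] := by
          simp [PySem.Set.add, List.mem_filter, hm]
        have h3 : (acc ++ [x]).filter p = acc.filter p ++ [x] := by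
          simp [List.filter_append, hx]
        simp [List.foldl_cons, h1, h2, h3, hx, ih (acc ++ [x])]
    · by_cases hm : x ∈ acc
      · simp [List.foldl_cons, hx, PySem.Set.add, hm, ih acc]
      · have h1 : PySem.Set.add acc x = acc ++ [x] := by simp [PySem.Set.add, hm]
        simp [List.foldl_cons, h1, hx, ih (acc ++ [x]), List.filter_append]

-- flattening the preferred part of the buckets
theorem pfo_flatten_map (pref d : List String) :
    (pref.map (fun n => if n ∈ d then [n] else [])).flatten
      = pref.filter (fun n => d.contains n) := by
  induction pref with
  | nil => simp
  | cons x l ih =>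
    by_cases hx : x ∈ d <;> simp [hx, ih]

-- a string outside the preferred list gets the default rank 8
theorem pfo_rank_default (g : String) (hg : g ∉ pfoPref) :
    PySem.Dict.getD pfoRank g ((pfoPref.length : Nat) : Int) = 8 := by
  simp only [pfoPref, List.mem_cons, List.not_mem_nil, or_false, not_or] at hg
  obtain ⟨h0, h1, h2, h3, h4, h5, h6, h7⟩ := hg
  have b0 : ("id" == g) = false := by simp [Ne.symm h0]
  have b1 : ("name" == g) = false := by simp [Ne.symm h1]
  have b2 : ("email" == g) = false := by simp [Ne.symm h2]
  have b3 : ("phone" == g) = false := by simp [Ne.symm h3]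
  have b4 : ("contact_name" == g) = false := by simp [Ne.symm h4]
  have b5 : ("url" == g) = false := by simp [Ne.symm h5]
  have b6 : ("created_at" == g) = false := by simp [Ne.symm h6]
  have b7 : ("updated_at" == g) = false := by simp [Ne.symm h7]
  simp [pfoRank, pfoPref, PySem.Dict.getD, PySem.Dict.get?, PySem.List.enumerate,
    PySem.Dict.insert, PySem.Dict.empty, PySem.Dict.contains, List.find?,
    b0, b1, b2, b3, b4, b5, b6, b7]

-- one step of B's bucket fold
theorem pfo_bucket_step (p : List String) (f : String) (hf : f ∉ p) :
    (pfoBuckets p).modify (PySem.Dict.getD pfoRank f ((pfoPref.length : Nat) : Int)).toNat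
        (fun b => b ++ [f])
      = pfoBuckets (p ++ [f]) := by
  by_cases c0 : f = "id"
  · subst c0
    have hidx : (PySem.Dict.getD pfoRank "id" ((pfoPref.length : Nat) : Int)).toNat = 0 := by decide
    rw [hidx]; simp [pfoBuckets, pfoPref, hf, List.modify, List.filter_append]
  by_cases c1 : f = "name"
  · subst c1
    have hidx : (PySem.Dict.getD pfoRank "name" ((pfoPref.length : Nat) : Int)).toNat = 1 := by decide
    rw [hidx]; simp [pfoBuckets, pfoPref, hf, List.modify, List.filter_append]
  by_cases c2 : f = "email"
  · subst c2
    have hidx : (PySem.Dict.getD pfoRank "email" ((pfoPref.length : Nat) : Int)).toNat = 2 := by decide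
    rw [hidx]; simp [pfoBuckets, pfoPref, hf, List.modify, List.filter_append]
  by_cases c3 : f = "phone"
  · subst c3
    have hidx : (PySem.Dict.getD pfoRank "phone" ((pfoPref.length : Nat) : Int)).toNat = 3 := by decide
    rw [hidx]; simp [pfoBuckets, pfoPref, hf, List.modify, List.filter_append]
  by_cases c4 : f = "contact_name"
  · subst c4
    have hidx : (PySem.Dict.getD pfoRank "contact_name" ((pfoPref.length : Nat) : Int)).toNat = 4 := by decide
    rw [hidx]; simp [pfoBuckets, pfoPref, hf, List.modify, List.filter_append]
  by_cases c5 : f = "url"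
  · subst c5
    have hidx : (PySem.Dict.getD pfoRank "url" ((pfoPref.length : Nat) : Int)).toNat = 5 := by decide
    rw [hidx]; simp [pfoBuckets, pfoPref, hf, List.modify, List.filter_append]
  by_cases c6 : f = "created_at"
  · subst c6
    have hidx : (PySem.Dict.getD pfoRank "created_at" ((pfoPref.length : Nat) : Int)).toNat = 6 := by decide
    rw [hidx]; simp [pfoBuckets, pfoPref, hf, List.modify, List.filter_append]
  by_cases c7 : f = "updated_at"
  · subst c7
    have hidx : (PySem.Dict.getD pfoRank "updated_at" ((pfoPref.length : Nat) : Int)).toNat = 7 := by decide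
    rw [hidx]; simp [pfoBuckets, pfoPref, hf, List.modify, List.filter_append]
  have hnp : f ∉ pfoPref := by simp [pfoPref, c0, c1, c2, c3, c4, c5, c6, c7]
  rw [pfo_rank_default f hnp]
  simp [pfoBuckets, pfoPref, List.modify, List.filter_append,
    c0, c1, c2, c3, c4, c5, c6, c7, Ne.symm c0, Ne.symm c1, Ne.symm c2, Ne.symm c3,
    Ne.symm c4, Ne.symm c5, Ne.symm c6, Ne.symm c7]

-- B's whole bucket fold
theorem pfo_bucket_fold (d : List String) : ∀ (p : List String), d.Nodup →
    (∀ f ∈ d, f ∉ p) →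
    d.foldl (fun bs f =>
        bs.modify (PySem.Dict.getD pfoRank f ((pfoPref.length : Nat) : Int)).toNat
          (fun b => b ++ [f])) (pfoBuckets p)
      = pfoBuckets (p ++ d) := by
  induction d with
  | nil => intro p _ _; simp
  | cons f r ih =>
    intro p hnd hdis
    have hf : f ∉ p := hdis f (by simp)
    have hdis' : ∀ g ∈ r, g ∉ p ++ [f] := by
      intro g hg hmem
      rcases List.mem_append.mp hmem with h | h
      · exact hdis g (by simp [hg]) h
      · exact (List.nodup_cons.mp hnd).1 ((List.mem_singleton.mp h) ▸ hg)
    rw [List.foldl_cons, pfo_bucket_step p f hf, ih (p ++ [f]) (List.Nodup.of_cons hnd) hdis']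
    simp

-- A's result in closed form
theorem pfo_A_closed (fields : List String) :
    preferred_field_order_py fields
      = pfoPref.filter (fun n => fields.contains n)
        ++ (PySem.List.dedup fields).filter (fun f => !(pfoPref.contains f)) := by
  have h0 : preferred_field_order_py fields
      = fields.foldl PySem.Set.add (pfoPref.filter (fun n => fields.contains n) ++ []) := by
    rw [List.append_nil]; rfl
  rw [h0, pfo_foldl_add_split]
  congr 1
  have hcong : fields.filter (fun f => !((pfoPref.filter (fun n => fields.contains n)).contains f))
      = fields.filter (fun f => !(pfoPref.contains f)) := by
    apply List.filter_congr
    intro x hx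
    simp [List.mem_filter, hx]
  rw [hcong]
  have h1 := pfo_filter_foldl_add (fun f => !(pfoPref.contains f)) fields []
  simp only [List.filter_nil] at h1
  exact h1.symm

-- B's result in the same closed form
theorem pfo_B_closed (fields : List String) :
    preferred_field_order_py_alt fields
      = pfoPref.filter (fun n => fields.contains n)
        ++ (PySem.List.dedup fields).filter (fun f => !(pfoPref.contains f)) := by
  have h0 : preferred_field_order_py_alt fields
      = ((PySem.List.dedup fields).foldl (fun bs f =>
          bs.modify (PySem.Dict.getD pfoRank f ((pfoPref.length : Nat) : Int)).toNat
            (fun b => b ++ [f])) (pfoBuckets [])).flatten := rfl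
  rw [h0, pfo_bucket_fold (PySem.List.dedup fields) [] (PySem.List.nodup_dedup fields) (by simp)]
  simp only [List.nil_append]
  unfold pfoBuckets
  rw [List.flatten_append, pfo_flatten_map]
  have hcong : pfoPref.filter (fun n => (PySem.List.dedup fields).contains n)
      = pfoPref.filter (fun n => fields.contains n) := by
    apply List.filter_congr
    intro x _
    simp
  rw [hcong]
  simp

-- ===== VERDICT (by name: the statement is the Claim_ definition above) =====
theorem preferred_field_order_py_spec : Claim_equal_preferred_field_order_py := by
  intro fields _
  show preferred_field_order_py fields = preferred_field_order_py_alt fields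
  rw [pfo_A_closed, pfo_B_closed]
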